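-- pv_equiv track=rewrite | github.com/AkeelMedina22/Advent-of-Code-2023 | Day 1/solution.py | task_p1
-- ===== SOURCE A (Python) =====
-- def task_p1(data: str) -> int:
--     i: int = 0
--     j: int = len(data) - 1
--
--     i_val: int = 0
--     j_val: int = 0
--
--     while i <= j:
--         if data[i].isdigit():
--             i_val = int(data[i])
--             break
--         i += 1
--
--     while j >= i:
--         if data[j].isdigit():
--             j_val = int(data[j])
--             break
--         j -= 1
--
--     return int(f"{i_val}{j_val}")
-- ===== SOURCE B (Python) =====
-- def task_p1(data: str) -> int:
--     digits = [c for c in data if c.isdigit()]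
--     if not digits:
--         return 0
--     return int(digits[0]) * 10 + int(digits[-1])
-- ===== Notes on version B (the rewrite author's own statement) =====
-- stated objective: simpler
-- what changed: Replaces A's two separate index-based early-stopping scans (forward and backward) plus an f-string/int round-trip with a single left-to-right filter of the digit characters, returning 10*first + last (0 when there are none); the comprehension avoids per-character indexing overhead.
import Mathlib
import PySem

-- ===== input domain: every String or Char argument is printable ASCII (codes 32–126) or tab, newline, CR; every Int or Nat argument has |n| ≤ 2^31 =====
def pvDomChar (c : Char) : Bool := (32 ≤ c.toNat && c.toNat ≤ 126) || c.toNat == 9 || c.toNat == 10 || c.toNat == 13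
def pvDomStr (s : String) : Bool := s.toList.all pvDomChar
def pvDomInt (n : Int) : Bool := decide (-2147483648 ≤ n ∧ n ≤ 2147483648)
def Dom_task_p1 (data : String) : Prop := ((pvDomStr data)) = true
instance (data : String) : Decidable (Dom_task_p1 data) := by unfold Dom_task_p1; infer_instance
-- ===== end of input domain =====

-- B replaces A's two early-stopping index scans and f-string/int round-trip by one
-- filter pass over the characters, combining first and last digit arithmetically; objective: simpler.

-- int(c) for a single digit character c (both Pythons apply int() only to digit chars);
-- exact there: int('0'..'9') = code point - 48.
def pvDigitInt (c : Char) : Int := (c.toNat : Int) - 48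

-- ===== PORT A =====
-- first while loop: advance i while data[i] is not a digit; returns (final i, i_val)
def pvLoop1 (cs : List Char) (i j : Int) : Int × Int :=
  if _h : i ≤ j then
    let c := (PySem.List.pyGet? cs i).getD ' '   -- data[i]; i ∈ [0, j] is always in range here
    if c.isDigit then (i, pvDigitInt c)          -- Char.isDigit = str.isdigit on ASCII (Dom)
    else pvLoop1 cs (i + 1) j
  else (i, 0)
  termination_by (j + 1 - i).toNat
  decreasing_by omega

-- second while loop: decrease j while data[j] is not a digit; returns j_val
def pvLoop2 (cs : List Char) (i j : Int) : Int :=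
  if _h : j ≥ i then
    let c := (PySem.List.pyGet? cs j).getD ' '   -- data[j]
    if c.isDigit then pvDigitInt c
    else pvLoop2 cs i (j - 1)
  else 0
  termination_by (j + 1 - i).toNat
  decreasing_by omega

def task_p1 (data : String) : Int :=
  let cs := data.toList
  let r := pvLoop1 cs 0 ((cs.length : Int) - 1)
  let jval := pvLoop2 cs r.1 ((cs.length : Int) - 1)
  -- int(f"{i_val}{j_val}")
  (PySem.Int.ofStr? (String.ofList (PySem.Int.toChars r.2 ++ PySem.Int.toChars jval))).getD 0

-- ===== PORT B =====
def task_p1_alt (data : String) : Int :=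
  let digits := data.toList.filter Char.isDigit  -- c.isdigit() = Char.isDigit on ASCII (Dom)
  match digits with
  | [] => 0
  | c :: _ => pvDigitInt c * 10 + pvDigitInt (digits.getLastD ' ')

-- ===== PRECONDITION & SPEC =====
def Spec_task_p1 (data : String) (out : Int) : Prop := out = task_p1_alt data
instance (data : String) (out : Int) : Decidable (Spec_task_p1 data out) := by unfold Spec_task_p1; infer_instance

-- ===== CLAIM (what is proved, stated in full; the proofs are below) =====
def Claim_equal_task_p1 : Prop := ∀ (data : String), Dom_task_p1 data → Spec_task_p1 data (task_p1 data)

-- ===== LEMMAS AND PROOFS =====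

theorem pvDigitInt_bounds (c : Char) (h : c.isDigit = true) :
    0 ≤ pvDigitInt c ∧ pvDigitInt c ≤ 9 := by
  rw [Char.isDigit] at h
  simp only [Bool.and_eq_true, decide_eq_true_eq] at h
  obtain ⟨h1, h2⟩ := h
  have h1' : (48 : Nat) ≤ c.toNat := h1
  have h2' : c.toNat ≤ (57 : Nat) := h2
  unfold pvDigitInt
  omega

-- int(f"{a}{b}") = 10*a + b for single digits a, b
theorem pvCombine (a b : Int) (ha0 : 0 ≤ a) (ha9 : a ≤ 9) (hb0 : 0 ≤ b) (hb9 : b ≤ 9) :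
    (PySem.Int.ofStr? (String.ofList (PySem.Int.toChars a ++ PySem.Int.toChars b))).getD 0
      = 10 * a + b := by
  interval_cases a <;> interval_cases b <;> decide

-- the first loop over a digit-free stretch p starting at index pre.length ends with index
-- just past p and value of the digit c that follows
theorem pvLoop1_some (p : List Char) : ∀ (pre q : List Char) (c : Char),
    (∀ x ∈ p, x.isDigit = false) → c.isDigit = true →
    pvLoop1 (pre ++ p ++ c :: q) (pre.length) (((pre ++ p ++ c :: q).length : Int) - 1)
      = ((pre.length + p.length : Int), pvDigitInt c) := by
  induction p with
  | nil =>
    intro pre q c _ hc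
    rw [pvLoop1]
    have hget : (pre ++ [] ++ c :: q)[pre.length]? = some c := by
      simp
    rw [dif_pos (by simp only [List.append_nil, List.length_append, List.length_cons]; push_cast; omega)]
    simp only [PySem.List.pyGet?_natCast, hget, Option.getD_some, hc, if_pos]
    simp
  | cons x p ih =>
    intro pre q c hp hc
    rw [pvLoop1]
    have hget : (pre ++ x :: p ++ c :: q)[pre.length]? = some x := by
      simp
    rw [dif_pos (by simp only [List.length_append, List.length_cons]; push_cast; omega)]
    have hx : x.isDigit = false := hp x (by simp)
    simp only [PySem.List.pyGet?_natCast, hget, Option.getD_some, hx]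
    rw [if_neg (by simp)]
    have hre : pre ++ x :: p ++ c :: q = (pre ++ [x]) ++ p ++ c :: q := by simp
    have := ih (pre ++ [x]) q c (fun y hy => hp y (by simp [hy])) hc
    rw [hre]
    have hlen : ((pre.length : Int) + 1) = ((pre ++ [x]).length : Int) := by simp
    rw [hlen, this]
    simp only [List.length_append, List.length_cons, List.length_nil, Prod.mk.injEq]
    exact ⟨by push_cast; omega, trivial⟩

-- the first loop over an entirely digit-free remainder runs off the end
theorem pvLoop1_none (p : List Char) : ∀ (pre : List Char),
    (∀ x ∈ p, x.isDigit = false) →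
    pvLoop1 (pre ++ p) (pre.length) (((pre ++ p).length : Int) - 1)
      = (((pre ++ p).length : Int), 0) := by
  induction p with
  | nil =>
    intro pre _
    rw [pvLoop1]
    rw [dif_neg (by simp only [List.append_nil]; omega)]
    simp
  | cons x p ih =>
    intro pre hp
    rw [pvLoop1]
    have hget : (pre ++ x :: p)[pre.length]? = some x := by simp
    rw [dif_pos (by simp only [List.length_append, List.length_cons]; push_cast; omega)]
    have hx : x.isDigit = false := hp x (by simp)
    simp only [PySem.List.pyGet?_natCast, hget, Option.getD_some, hx]
    rw [if_neg (by simp)]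
    have hre : pre ++ x :: p = (pre ++ [x]) ++ p := by simp
    have := ih (pre ++ [x]) (fun y hy => hp y (by simp [hy]))
    have hlen : ((pre.length : Int) + 1) = ((pre ++ [x]).length : Int) := by simp
    rw [hre, hlen, this]

-- the second loop, started at the last index of u ++ c :: s, walks down over the
-- digit-free s and stops at the digit c (tail is scratch already walked past)
theorem pvLoop2_some (s : List Char) : ∀ (u : List Char) (c : Char) (tail : List Char) (i : Int),
    c.isDigit = true → (∀ x ∈ s, x.isDigit = false) → i ≤ (u.length : Int) →
    pvLoop2 (u ++ c :: s ++ tail) i (((u ++ c :: s).length : Int) - 1)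
      = pvDigitInt c := by
  induction s using List.reverseRecOn with
  | nil =>
    intro u c tail i hc _ hi
    rw [pvLoop2]
    rw [dif_pos (by simp only [List.length_append, List.length_cons]; push_cast; omega)]
    have hj : ((u ++ c :: ([] : List Char)).length : Int) - 1 = ((u.length : Nat) : Int) := by
      simp
    rw [hj]
    have hget' : (u ++ c :: ([] : List Char) ++ tail)[u.length]? = some c := by simp
    simp only [PySem.List.pyGet?_natCast, hget', Option.getD_some, hc, if_pos]
  | append_singleton s x ih =>
    intro u c tail i hc hs hi
    rw [pvLoop2]
    have hlen : ((u ++ c :: (s ++ [x])).length : Int) - 1 = ((u.length + 1 + s.length : Nat) : Int) := by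
      simp; omega
    rw [hlen]
    rw [dif_pos (by push_cast; omega)]
    have hget : (u ++ c :: (s ++ [x]) ++ tail)[(u.length + 1 + s.length : Nat)]? = some x := by
      have he : u ++ c :: (s ++ [x]) ++ tail = (u ++ c :: s) ++ (x :: tail) := by simp
      rw [he]
      rw [List.getElem?_append_right (by simp only [List.length_append, List.length_cons]; omega)]
      have h0 : u.length + 1 + s.length - (u ++ c :: s).length = 0 := by
        simp only [List.length_append, List.length_cons]; omega
      rw [h0]
      rfl
    have hx : x.isDigit = false := hs x (by simp)
    simp only [PySem.List.pyGet?_natCast, hget, Option.getD_some, hx]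
    rw [if_neg (by simp)]
    have hre : u ++ c :: (s ++ [x]) ++ tail = u ++ c :: s ++ (x :: tail) := by simp
    have harg : ((u.length + 1 + s.length : Nat) : Int) - 1 = ((u ++ c :: s).length : Int) - 1 := by
      simp; omega
    rw [hre, harg, ih u c (x :: tail) i hc (fun y hy => hs y (by simp [hy])) hi]

-- the second loop with lower bound strictly above the upper bound returns 0
theorem pvLoop2_below (cs : List Char) (i j : Int) (h : j < i) : pvLoop2 cs i j = 0 := by
  rw [pvLoop2]
  rw [dif_neg (by omega)]

-- ===== VERDICT (by name: the statement is the Claim_ definition above) =====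
theorem task_p1_spec : Claim_equal_task_p1 := by
  intro data _
  unfold Spec_task_p1 task_p1 task_p1_alt
  dsimp only
  generalize data.toList = cs
  cases hfil : cs.filter Char.isDigit with
  | nil =>
    have hall : ∀ x ∈ cs, x.isDigit = false := by
      intro x hx
      have := List.filter_eq_nil_iff.mp hfil x hx
      simpa using this
    have h1 := pvLoop1_none cs [] hall
    simp only [List.nil_append, List.length_nil, Nat.cast_zero] at h1
    rw [h1]
    rw [pvLoop2_below _ _ _ (by omega)]
    simpa using pvCombine 0 0 (by norm_num) (by norm_num) (by norm_num) (by norm_num)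
  | cons c rest =>
    obtain ⟨l₁, l₂, hdecomp, hl₁, hc, _⟩ := List.filter_eq_cons_iff.mp hfil
    -- last digit via the reversed list
    have hrevfil : cs.reverse.filter Char.isDigit = (c :: rest).reverse := by
      rw [List.filter_reverse, hfil]
    have hne : cs.reverse.filter Char.isDigit ≠ [] := by
      rw [hrevfil]; simp
    obtain ⟨c', rest', hrev⟩ := List.exists_cons_of_ne_nil hne
    obtain ⟨m₁, m₂, hdecR, hm₁, hc', _⟩ := List.filter_eq_cons_iff.mp hrev
    have hcsR : cs = m₂.reverse ++ c' :: m₁.reverse := by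
      have := congrArg List.reverse hdecR
      simpa using this
    -- first loop: first digit at index l₁.length with value c
    have hl₁' : ∀ x ∈ l₁, x.isDigit = false := by
      intro x hx; simpa using hl₁ x hx
    have h1 := pvLoop1_some l₁ [] l₂ c hl₁' hc
    simp only [List.nil_append, List.length_nil, Nat.cast_zero, zero_add] at h1
    rw [← hdecomp] at h1
    rw [h1]
    -- lower bound for the second loop: l₁.length ≤ m₂.length
    have hlen_le : (l₁.length : Int) ≤ (m₂.reverse.length : Int) := by
      by_contra hlt
      push Not at hlt
      -- then c' sits inside l₁, contradicting that l₁ is digit-free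
      have hidx : m₂.reverse.length < l₁.length := by exact_mod_cast hlt
      have hget1 : cs[m₂.reverse.length]? = some c' := by
        rw [hcsR, List.getElem?_append_right (le_refl _)]
        simp
      have hget2 : cs[m₂.reverse.length]? = l₁[m₂.reverse.length]? := by
        rw [hdecomp, List.getElem?_append_left hidx]
      have hmem : c' ∈ l₁ := by
        rw [hget1] at hget2
        exact List.mem_of_getElem? hget2.symm
      have := hl₁' c' hmem
      rw [hc'] at this
      exact absurd this (by simp)
    have hm₁' : ∀ x ∈ m₁.reverse, x.isDigit = false := by
      intro x hx; simpa using hm₁ x (by simpa using hx)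
    have h2 := pvLoop2_some m₁.reverse m₂.reverse c' [] (l₁.length : Int) hc' hm₁' hlen_le
    simp only [List.append_nil] at h2
    rw [← hcsR] at h2
    rw [h2]
    -- the last digit of the filtered list is c'
    have hlast : (c :: rest).getLastD ' ' = c' := by
      have : (c :: rest).getLast? = some c' := by
        rw [List.getLast?_eq_head?_reverse, ← hrevfil, hrev]
        simp
      rw [List.getLastD_eq_getLast?, this]
      rfl
    obtain ⟨ha0, ha9⟩ := pvDigitInt_bounds c hc
    obtain ⟨hb0, hb9⟩ := pvDigitInt_bounds c' hc'
    rw [pvCombine _ _ ha0 ha9 hb0 hb9]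
    dsimp only
    rw [hlast]
    ring
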